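-- pv_equiv track=rewrite | github.com/bipindeshpande/idea | tests/integration/test_discovery_real_integration.py | extract_psychology_from_output
-- ===== SOURCE A (Python) =====
-- from typing import Dict, Any
--
-- def extract_psychology_from_output(output: str) -> Dict[str, Any]:
--     """Extract psychology-related content from output."""
--     psychology = {
--         "tone": None,
--         "risk_style": None,
--         "roadmap_30": None,
--         "roadmap_60": None,
--         "roadmap_90": None,
--         "top_idea": None
--     }
--
--     # Extract tone
--     if "tone:" in output.lower():
--         tone_line = [line for line in output.split('\n') if 'tone:' in line.lower()][0]
--         psychology["tone"] = tone_line.split(':')[-1].strip()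
--
--     # Extract risk style
--     if "risk" in output.lower() and ("framing" in output.lower() or "style" in output.lower()):
--         risk_lines = [line for line in output.split('\n') if 'risk' in line.lower() and ':' in line]
--         if risk_lines:
--             psychology["risk_style"] = risk_lines[0].split(':')[-1].strip()
--
--     # Extract roadmap
--     if "30-day" in output.lower() or "30 day" in output.lower():
--         roadmap_lines = [line for line in output.split('\n') if '30' in line.lower() and 'day' in line.lower()]
--         if roadmap_lines:
--             psychology["roadmap_30"] = roadmap_lines[0]
--
--     if "60-day" in output.lower() or "60 day" in output.lower():
--         roadmap_lines = [line for line in output.split('\n') if '60' in line.lower() and 'day' in line.lower()]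
--         if roadmap_lines:
--             psychology["roadmap_60"] = roadmap_lines[0]
--
--     if "90-day" in output.lower() or "90 day" in output.lower():
--         roadmap_lines = [line for line in output.split('\n') if '90' in line.lower() and 'day' in line.lower()]
--         if roadmap_lines:
--             psychology["roadmap_90"] = roadmap_lines[0]
--
--     # Extract top idea
--     if "### 1." in output or "1." in output[:100]:
--         lines = output.split('\n')
--         for i, line in enumerate(lines):
--             if "### 1." in line or (line.strip().startswith("1.") and i < 10):
--                 psychology["top_idea"] = line.replace("###", "").replace("1.", "").strip()
--                 break
--
--     return psychology
-- ===== SOURCE B (Python) =====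
-- def extract_psychology_from_output(output: str):
--     """Extract psychology-related content from output (single-pass rewrite)."""
--     lines = output.split('\n')
--     low = output.lower()
--     tone = risk = r30 = r60 = r90 = top = None
--     for i, line in enumerate(lines):
--         ll = line.lower()
--         if tone is None and 'tone:' in ll:
--             tone = line
--         if risk is None and 'risk' in ll and ':' in line:
--             risk = line
--         if r30 is None and '30' in ll and 'day' in ll:
--             r30 = line
--         if r60 is None and '60' in ll and 'day' in ll:
--             r60 = line
--         if r90 is None and '90' in ll and 'day' in ll:
--             r90 = line
--         if top is None and ("### 1." in line or (line.strip().startswith("1.") and i < 10)):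
--             top = line
--
--     def last_colon(s):
--         return s.split(':')[-1].strip()
--
--     return {
--         "tone": last_colon(tone) if 'tone:' in low else None,
--         "risk_style": (last_colon(risk) if risk is not None else None)
--                       if ('risk' in low and ('framing' in low or 'style' in low)) else None,
--         "roadmap_30": r30 if ('30-day' in low or '30 day' in low) else None,
--         "roadmap_60": r60 if ('60-day' in low or '60 day' in low) else None,
--         "roadmap_90": r90 if ('90-day' in low or '90 day' in low) else None,
--         "top_idea": (top.replace("###", "").replace("1.", "").strip() if top is not None else None)
--                     if ("### 1." in output or "1." in output[:100]) else None,
--     }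
-- ===== Notes on version B (the rewrite author's own statement) =====
-- stated objective: alternative
-- what changed: A splits the output and filters the line list five separate times plus a sixth enumerate-loop; B splits and lowercases once and makes a single forward pass over the lines keeping the first line matching each category's predicate, then applies the whole-output guards and formatting.
import Mathlib
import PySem

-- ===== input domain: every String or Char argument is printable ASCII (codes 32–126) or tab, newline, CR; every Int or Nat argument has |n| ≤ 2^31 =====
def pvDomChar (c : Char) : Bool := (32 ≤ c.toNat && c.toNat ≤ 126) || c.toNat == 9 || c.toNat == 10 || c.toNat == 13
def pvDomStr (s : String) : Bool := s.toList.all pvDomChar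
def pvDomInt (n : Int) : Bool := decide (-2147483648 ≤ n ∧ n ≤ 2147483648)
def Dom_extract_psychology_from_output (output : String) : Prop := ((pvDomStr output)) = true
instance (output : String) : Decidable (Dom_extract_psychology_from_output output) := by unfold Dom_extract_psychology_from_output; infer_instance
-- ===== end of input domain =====

-- ===== PORT A =====
-- B restructures A into one pass over the lines; return-value equivalence only (objective: alternative decomposition).

-- shared with B: line.split(':')[-1].strip()
def pvLastColon (line : String) : String :=
  PySem.Str.strip ((PySem.List.pyGet? ((PySem.Str.split? line ":").getD []) (-1)).getD "")

-- shared with B: output.split('\n')  (separator is non-empty, so split? never returns none)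
def pvLines (output : String) : List String :=
  (PySem.Str.split? output "\n").getD []

-- shared with B: line.replace("###", "").replace("1.", "").strip()
def pvFmtTop (line : String) : String :=
  PySem.Str.strip (PySem.Str.replace (PySem.Str.replace line "###" "") "1." "")

-- shared with B: "### 1." in line or (line.strip().startswith("1.") and i < 10)
def pvTopPred (i : Int) (line : String) : Bool :=
  PySem.Str.isIn "### 1." line ||
    (PySem.Str.startswith (PySem.Str.strip line) "1." && decide (i < 10))

-- A's 'for i, line in enumerate(lines): if …: psychology["top_idea"] = …; break'
def pvTopLoopA : List (Int × String) → Option String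
  | [] => none
  | (i, line) :: rest =>
    if pvTopPred i line then some (pvFmtTop line) else pvTopLoopA rest

def extract_psychology_from_output (output : String) : List (String × Option String) :=
  -- the psychology dict's six fixed keys, assigned in A's order and rendered as the assoc list at the end
  let tone : Option String :=
    if PySem.Str.isIn "tone:" (PySem.Str.lower output) then
      -- [ … ][0]: in Python an IndexError if empty, but the guard guarantees a matching line
      let tone_line := (PySem.List.pyGet?
        ((pvLines output).filter (fun line => PySem.Str.isIn "tone:" (PySem.Str.lower line))) 0).getD ""
      some (pvLastColon tone_line)
    else none
  let risk_style : Option String :=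
    if PySem.Str.isIn "risk" (PySem.Str.lower output) &&
        (PySem.Str.isIn "framing" (PySem.Str.lower output) || PySem.Str.isIn "style" (PySem.Str.lower output)) then
      match (pvLines output).filter
          (fun line => PySem.Str.isIn "risk" (PySem.Str.lower line) && PySem.Str.isIn ":" line) with
      | [] => none
      | l :: _ => some (pvLastColon l)
    else none
  let roadmap_30 : Option String :=
    if PySem.Str.isIn "30-day" (PySem.Str.lower output) || PySem.Str.isIn "30 day" (PySem.Str.lower output) then
      match (pvLines output).filter
          (fun line => PySem.Str.isIn "30" (PySem.Str.lower line) && PySem.Str.isIn "day" (PySem.Str.lower line)) with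
      | [] => none
      | l :: _ => some l
    else none
  let roadmap_60 : Option String :=
    if PySem.Str.isIn "60-day" (PySem.Str.lower output) || PySem.Str.isIn "60 day" (PySem.Str.lower output) then
      match (pvLines output).filter
          (fun line => PySem.Str.isIn "60" (PySem.Str.lower line) && PySem.Str.isIn "day" (PySem.Str.lower line)) with
      | [] => none
      | l :: _ => some l
    else none
  let roadmap_90 : Option String :=
    if PySem.Str.isIn "90-day" (PySem.Str.lower output) || PySem.Str.isIn "90 day" (PySem.Str.lower output) then
      match (pvLines output).filter
          (fun line => PySem.Str.isIn "90" (PySem.Str.lower line) && PySem.Str.isIn "day" (PySem.Str.lower line)) with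
      | [] => none
      | l :: _ => some l
    else none
  let top_idea : Option String :=
    if PySem.Str.isIn "### 1." output || PySem.Str.isIn "1." (PySem.Str.slice output none (some 100)) then
      pvTopLoopA (PySem.List.enumerate (pvLines output))
    else none
  [("tone", tone), ("risk_style", risk_style), ("roadmap_30", roadmap_30),
   ("roadmap_60", roadmap_60), ("roadmap_90", roadmap_90), ("top_idea", top_idea)]

-- ===== PORT B =====
-- B's loop state: the first line seen so far that matches each category's line predicate
structure PvSt where
  tone : Option String
  risk : Option String
  r30  : Option String
  r60  : Option String
  r90  : Option String
  top  : Option String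
  deriving Repr, DecidableEq

-- 'if x is None and hit: x = line'
def pvUpd (o : Option String) (hit : Bool) (line : String) : Option String :=
  if o.isNone && hit then some line else o

def pvStep (st : PvSt) (e : Int × String) : PvSt :=
  let line := e.2
  let ll := PySem.Str.lower line
  { tone := pvUpd st.tone (PySem.Str.isIn "tone:" ll) line
    risk := pvUpd st.risk (PySem.Str.isIn "risk" ll && PySem.Str.isIn ":" line) line
    r30  := pvUpd st.r30 (PySem.Str.isIn "30" ll && PySem.Str.isIn "day" ll) line
    r60  := pvUpd st.r60 (PySem.Str.isIn "60" ll && PySem.Str.isIn "day" ll) line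
    r90  := pvUpd st.r90 (PySem.Str.isIn "90" ll && PySem.Str.isIn "day" ll) line
    top  := pvUpd st.top (pvTopPred e.1 line) line }

def extract_psychology_from_output_alt (output : String) : List (String × Option String) :=
  let lines := pvLines output
  let low := PySem.Str.lower output
  let st := (PySem.List.enumerate lines).foldl pvStep ⟨none, none, none, none, none, none⟩
  [("tone", if PySem.Str.isIn "tone:" low then some (pvLastColon (st.tone.getD "")) else none),
   ("risk_style",
     if PySem.Str.isIn "risk" low && (PySem.Str.isIn "framing" low || PySem.Str.isIn "style" low) then
       st.risk.map pvLastColon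
     else none),
   ("roadmap_30", if PySem.Str.isIn "30-day" low || PySem.Str.isIn "30 day" low then st.r30 else none),
   ("roadmap_60", if PySem.Str.isIn "60-day" low || PySem.Str.isIn "60 day" low then st.r60 else none),
   ("roadmap_90", if PySem.Str.isIn "90-day" low || PySem.Str.isIn "90 day" low then st.r90 else none),
   ("top_idea",
     if PySem.Str.isIn "### 1." output || PySem.Str.isIn "1." (PySem.Str.slice output none (some 100)) then
       st.top.map pvFmtTop
     else none)]

-- ===== PRECONDITION & SPEC =====
def Spec_extract_psychology_from_output (output : String) (out : List (String × Option String)) : Prop := out = extract_psychology_from_output_alt output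
instance (output : String) (out : List (String × Option String)) : Decidable (Spec_extract_psychology_from_output output out) := by unfold Spec_extract_psychology_from_output; infer_instance

-- ===== CLAIM (what is proved, stated in full; the proofs are below) =====
def Claim_equal_extract_psychology_from_output : Prop := ∀ (output : String), Dom_extract_psychology_from_output output → Spec_extract_psychology_from_output output (extract_psychology_from_output output)

-- ===== LEMMAS AND PROOFS =====

-- first match kept by B's fold, as a find?
def pvFirst (p : Int × String → Bool) (es : List (Int × String)) : Option String :=
  (es.find? p).map (·.2)

lemma pvUpd_or (o : Option String) (p : Int × String → Bool) (e : Int × String)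
    (rest : List (Int × String)) :
    (pvUpd o (p e) e.2).or (pvFirst p rest) = o.or (pvFirst p (e :: rest)) := by
  cases o <;> simp [pvUpd, pvFirst, List.find?_cons]; split <;> simp_all

lemma pvStep_foldl (es : List (Int × String)) (st : PvSt) :
    es.foldl pvStep st =
      ⟨st.tone.or (pvFirst (fun e => PySem.Str.isIn "tone:" (PySem.Str.lower e.2)) es),
       st.risk.or (pvFirst (fun e => PySem.Str.isIn "risk" (PySem.Str.lower e.2) && PySem.Str.isIn ":" e.2) es),
       st.r30.or (pvFirst (fun e => PySem.Str.isIn "30" (PySem.Str.lower e.2) && PySem.Str.isIn "day" (PySem.Str.lower e.2)) es),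
       st.r60.or (pvFirst (fun e => PySem.Str.isIn "60" (PySem.Str.lower e.2) && PySem.Str.isIn "day" (PySem.Str.lower e.2)) es),
       st.r90.or (pvFirst (fun e => PySem.Str.isIn "90" (PySem.Str.lower e.2) && PySem.Str.isIn "day" (PySem.Str.lower e.2)) es),
       st.top.or (pvFirst (fun e => pvTopPred e.1 e.2) es)⟩ := by
  induction es generalizing st with
  | nil => simp [pvFirst]
  | cons e rest ih =>
    simp only [List.foldl_cons, ih, pvStep, PvSt.mk.injEq]
    exact ⟨pvUpd_or st.tone (fun e => PySem.Str.isIn "tone:" (PySem.Str.lower e.2)) e rest,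
           pvUpd_or st.risk (fun e => PySem.Str.isIn "risk" (PySem.Str.lower e.2) && PySem.Str.isIn ":" e.2) e rest,
           pvUpd_or st.r30 (fun e => PySem.Str.isIn "30" (PySem.Str.lower e.2) && PySem.Str.isIn "day" (PySem.Str.lower e.2)) e rest,
           pvUpd_or st.r60 (fun e => PySem.Str.isIn "60" (PySem.Str.lower e.2) && PySem.Str.isIn "day" (PySem.Str.lower e.2)) e rest,
           pvUpd_or st.r90 (fun e => PySem.Str.isIn "90" (PySem.Str.lower e.2) && PySem.Str.isIn "day" (PySem.Str.lower e.2)) e rest,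
           pvUpd_or st.top (fun e => pvTopPred e.1 e.2) e rest⟩

lemma pvTopLoopA_eq (es : List (Int × String)) :
    pvTopLoopA es = (es.find? (fun e => pvTopPred e.1 e.2)).map (fun e => pvFmtTop e.2) := by
  induction es with
  | nil => rfl
  | cons e rest ih =>
    obtain ⟨i, line⟩ := e
    simp only [pvTopLoopA, List.find?_cons]
    split <;> simp_all

lemma pvFirst_enumerate (l : List String) (p : String → Bool) (k : Int) :
    pvFirst (fun e => p e.2) (PySem.List.enumerate l k) = l.find? p := by
  induction l generalizing k with
  | nil => rfl
  | cons x xs ih =>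
    simp only [PySem.List.enumerate, pvFirst, List.find?_cons] at *
    by_cases h : p x <;> simp [h, ih]

-- the five snd-only predicates, instantiated so the final rewrite is first-order
lemma pvFirst_tone (l : List String) :
    pvFirst (fun e => PySem.Str.isIn "tone:" (PySem.Str.lower e.2)) (PySem.List.enumerate l)
      = l.find? (fun line => PySem.Str.isIn "tone:" (PySem.Str.lower line)) :=
  pvFirst_enumerate l (fun line => PySem.Str.isIn "tone:" (PySem.Str.lower line)) 0

lemma pvFirst_risk (l : List String) :
    pvFirst (fun e => PySem.Str.isIn "risk" (PySem.Str.lower e.2) && PySem.Str.isIn ":" e.2) (PySem.List.enumerate l)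
      = l.find? (fun line => PySem.Str.isIn "risk" (PySem.Str.lower line) && PySem.Str.isIn ":" line) :=
  pvFirst_enumerate l (fun line => PySem.Str.isIn "risk" (PySem.Str.lower line) && PySem.Str.isIn ":" line) 0

lemma pvFirst_30 (l : List String) :
    pvFirst (fun e => PySem.Str.isIn "30" (PySem.Str.lower e.2) && PySem.Str.isIn "day" (PySem.Str.lower e.2)) (PySem.List.enumerate l)
      = l.find? (fun line => PySem.Str.isIn "30" (PySem.Str.lower line) && PySem.Str.isIn "day" (PySem.Str.lower line)) :=
  pvFirst_enumerate l (fun line => PySem.Str.isIn "30" (PySem.Str.lower line) && PySem.Str.isIn "day" (PySem.Str.lower line)) 0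

lemma pvFirst_60 (l : List String) :
    pvFirst (fun e => PySem.Str.isIn "60" (PySem.Str.lower e.2) && PySem.Str.isIn "day" (PySem.Str.lower e.2)) (PySem.List.enumerate l)
      = l.find? (fun line => PySem.Str.isIn "60" (PySem.Str.lower line) && PySem.Str.isIn "day" (PySem.Str.lower line)) :=
  pvFirst_enumerate l (fun line => PySem.Str.isIn "60" (PySem.Str.lower line) && PySem.Str.isIn "day" (PySem.Str.lower line)) 0

lemma pvFirst_90 (l : List String) :
    pvFirst (fun e => PySem.Str.isIn "90" (PySem.Str.lower e.2) && PySem.Str.isIn "day" (PySem.Str.lower e.2)) (PySem.List.enumerate l)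
      = l.find? (fun line => PySem.Str.isIn "90" (PySem.Str.lower line) && PySem.Str.isIn "day" (PySem.Str.lower line)) :=
  pvFirst_enumerate l (fun line => PySem.Str.isIn "90" (PySem.Str.lower line) && PySem.Str.isIn "day" (PySem.Str.lower line)) 0

lemma pvHead?_map_match (l : List String) (f : String → String) :
    (match l with | [] => (none : Option String) | a :: _ => some (f a)) = l.head?.map f := by
  cases l <;> rfl

lemma pvGet0_getD (l : List String) : (PySem.List.pyGet? l 0).getD "" = l.head?.getD "" := by
  cases l <;> simp [PySem.List.pyGet?, PySem.List.pyIdx?]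

-- ===== VERDICT (by name: the statement is the Claim_ definition above) =====
theorem extract_psychology_from_output_spec : Claim_equal_extract_psychology_from_output := by
  intro output _
  unfold Spec_extract_psychology_from_output
  unfold extract_psychology_from_output extract_psychology_from_output_alt
  simp only [pvStep_foldl, Option.none_or, pvTopLoopA_eq, pvHead?_map_match, pvGet0_getD,
    List.head?_filter, pvFirst_tone, pvFirst_risk, pvFirst_30, pvFirst_60, pvFirst_90]
  simp only [pvFirst, Option.map_map]
  simp [Function.comp_def]
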